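-- pv_equiv track=rewrite | github.com/sebas-fontys/OR5-paintshop | sterling.py | gen_part
-- ===== SOURCE A (Python) =====
-- fact = [1]
--
-- def nCr(n: int, k: int) -> int:
--     """Return number of ways of choosing k elements from n"""
--     while len(fact)<=n:
--         fact.append(fact[-1]*len(fact))
--     return fact[n]//(fact[k]*fact[n-k])
--
-- cache = {}
--
-- def count_part(n: int, k: int) -> int:
--     """Return number of ways of partitioning n items into k non-empty subsets"""
--     if k==1:
--         return 1
--     key = n,k
--     if key in cache:
--         return cache[key]
--     # The first element goes into the next partition
--     # We can have up to y additional elements from the n-1 remaining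
--     # There will be n-1-y left over to partition into k-1 non-empty subsets
--     # so n-1-y>=k-1
--     # y<=n-k
--     t = 0
--     for y in range(0,n-k+1):
--         t += count_part(n-1-y,k-1) * nCr(n-1,y)
--     cache[key] = t
--     return t
--
-- def ith_subset(A: list, k: int, i: int) -> list:
--     """Returns the first subset from the ith k-subset partition of A"""
--     # Choose first element x
--     n = len(A)
--     if n==k:
--         return A
--     if k==0:
--         return []
--     for x in range(n):
--         # Find how many cases are possible with the first element being x
--         # There will be n-x-1 left over, from which we choose k-1
--         extra = nCr(n-x-1,k-1)
--         if i<extra: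
--             break
--         i -= extra
--     return [A[x]] + ith_subset(A[x+1:],k-1,i)
--
-- def gen_part(A: list, k: int, i: int) -> list[list]:
--     """Return i^th k-partition of elements in A (zero-indexed) as list of lists"""
--     if k==1:
--         return [A]
--     n=len(A)
--     # First find appropriate value for y - the extra amount in this subset
--     for y in range(0,n-k+1):
--         extra = count_part(n-1-y,k-1) * nCr(n-1,y)
--         if i<extra:
--             break
--         i -= extra
--     # We count through the subsets, and for each subset we count through the partitions
--     # Split i into a count for subsets and a count for the remaining partitions
--     count_partition,count_subset = divmod(i,nCr(n-1,y))
--     # Now find the i^th appropriate subset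
--     subset = [A[0]] + ith_subset(A[1:],y,count_subset)
--     S=set(subset)
--     return  [subset] + gen_part([a for a in A if a not in S],k-1,count_partition)
-- ===== SOURCE B (Python) =====
-- def gen_part(A, k, i):
--     """Return i^th k-partition of elements in A (zero-indexed) as list of lists"""
--     n = len(A)
--     if k == 1:
--         return [A]
--     # Pascal's triangle rows: C[m][j] == binom(m, j)
--     C = [[1]]
--     row = [1]
--     for m in range(1, n + 1):
--         row = [a + b for a, b in zip([0] + row, row + [0])]
--         C.append(row)
--     # Stirling numbers of the 2nd kind, row by row: S[m][j] = j*S[m-1][j] + S[m-1][j-1]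
--     srow = [1] + [0] * k  # row m = 0
--     S = [srow]
--     for m in range(1, n):
--         srow = [0] + [j * srow[j] + srow[j - 1] for j in range(1, k + 1)]
--         S.append(srow)
--
--     def unrank(rest, k, i):
--         if k == 1:
--             return [rest]
--         m = len(rest)
--         # pick y, the number of extra elements sharing the first element's block
--         for y in range(0, m - k + 1):
--             extra = S[m - 1 - y][k - 1] * C[m - 1][y]
--             if i < extra:
--                 break
--             i -= extra
--         i, j = divmod(i, C[m - 1][y])
--         # unrank the j-th y-subset of rest[1:] by one forward walk
--         block = [rest[0]]
--         kept = []
--         need = y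
--         tail = rest[1:]
--         while tail:
--             rem = len(tail)
--             if need == rem:
--                 block += tail
--                 tail = []
--             elif need == 0:
--                 kept += tail
--                 tail = []
--             else:
--                 c = C[rem - 1][need - 1]
--                 if j < c:
--                     block.append(tail[0])
--                     need -= 1
--                 else:
--                     j -= c
--                     kept.append(tail[0])
--                 tail = tail[1:]
--         return [block] + unrank(kept, k - 1, i)
--
--     return unrank(A, k, i)
-- ===== Notes on version B (the rewrite author's own statement) =====
-- stated objective: faster
-- what changed: B replaces A's memoized binomial-sum recursion for partition counts by row-by-row Stirling-number tables S(m,j)=j*S(m-1,j)+S(m-1,j-1) built once, replaces factorial-based nCr by Pascal's-triangle rows, and unranks each block's subset by a single forward walk with a positional kept-list instead of A's recursive slice-and-rescan ith_subset plus value-based set removal.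
-- outside the precondition, e.g. on gen_part([1, 1], 2, 0): A returns [[1], []], B returns [[1], [1]]; on gen_part([1, 1, 2], 3, 0): A raises UnboundLocalError, B returns [[1], [1], [2]]
import Mathlib
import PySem

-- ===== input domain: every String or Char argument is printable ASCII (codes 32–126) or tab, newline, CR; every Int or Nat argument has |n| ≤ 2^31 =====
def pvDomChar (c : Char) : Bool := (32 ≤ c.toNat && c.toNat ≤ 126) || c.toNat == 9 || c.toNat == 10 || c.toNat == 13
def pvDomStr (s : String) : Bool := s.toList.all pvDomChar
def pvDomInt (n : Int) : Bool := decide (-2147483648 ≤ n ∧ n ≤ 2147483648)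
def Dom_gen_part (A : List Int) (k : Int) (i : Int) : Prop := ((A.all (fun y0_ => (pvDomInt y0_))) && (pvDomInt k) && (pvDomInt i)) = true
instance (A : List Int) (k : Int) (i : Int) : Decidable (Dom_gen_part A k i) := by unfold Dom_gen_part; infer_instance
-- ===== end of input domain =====

-- B replaces A's memoized binomial-sum count by Stirling-recurrence rows, factorial nCr by
-- Pascal rows (built once), and the recursive slice-rescanning subset unranking with
-- value-based set removal by one forward walk keeping a positional remainder; faster tables.


-- ===== PORT A =====

-- fact/nCr: Python memoizes factorials in a global list; pure factorial is the same value.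
-- Exact for 0 ≤ k ≤ n — the only calls reached inside Pre_ (Python's negative-index global
-- fact[-1] lookups are never reached there).
def pyFact (n : Int) : Int := (Nat.factorial n.toNat : Int)

def nCr (n : Int) (k : Int) : Int :=
  PySem.Int.floordiv (pyFact n) (pyFact k * pyFact (n - k))

-- count_part: the module-level cache is pure memoization; same value as the plain recursion.
def count_part (n : Int) (k : Int) : Int :=
  if k = 1 then 1
  else if k ≤ 1 then 0  -- guard: Python recurses without end here (outside Pre_)
  else (PySem.List.pyRange 0 (n - k + 1) 1).foldl
        (fun t y => t + count_part (n - 1 - y) (k - 1) * nCr (n - 1) y) 0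
termination_by k.toNat
decreasing_by omega

-- the 'for x in range(n): … break' loop of ith_subset: returns Python's (x, i) after the loop
def ith_find (n : Int) (kk : Int) (pos : Int) (l : List Int) (i : Int) :
    Option Int × Int × List Int :=
  match l with
  | [] => (none, i, [])          -- Python: NameError (x unbound, n = 0); unreached inside Pre_
  | [a] =>
      let extra := nCr (n - pos - 1) (kk - 1)
      (some a, if i < extra then i else i - extra, [])
  | a :: b :: rest =>
      let extra := nCr (n - pos - 1) (kk - 1)
      if i < extra then (some a, i, b :: rest)
      else ith_find n kk (pos + 1) (b :: rest) (i - extra)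

theorem ith_find_rest_length (n kk : Int) : ∀ (l : List Int) (pos i : Int) (a : Int)
    (i' : Int) (r : List Int), ith_find n kk pos l i = (some a, i', r) → r.length < l.length := by
  intro l
  induction l with
  | nil => intro pos i a i' r h; simp [ith_find] at h
  | cons x t ih =>
    intro pos i a i' r h
    match t with
    | [] => simp [ith_find] at h; simp [h.2.2]
    | b :: rest =>
      rw [ith_find] at h
      by_cases hlt : i < nCr (n - pos - 1) (kk - 1)
      · simp only [if_pos hlt] at h
        cases h; simp
      · simp only [if_neg hlt] at h
        have := ih (pos + 1) _ _ _ _ h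
        simpa using Nat.lt_succ_of_lt this

def ith_subset (l : List Int) (kk : Int) (i : Int) : List Int :=
  if (l.length : Int) = kk then l
  else if kk = 0 then []
  else
    match h : ith_find (l.length : Int) kk 0 l i with
    | (none, _, _) => []         -- Python: NameError (l = []); unreached inside Pre_
    | (some a, i', r) => a :: ith_subset r (kk - 1) i'
termination_by l.length
decreasing_by exact ith_find_rest_length _ _ _ _ _ _ _ _ h

-- the 'for y in range(0, n-k+1): … break' loop of gen_part: Python's (y, i) after the loop
def gen_y_loop (n : Int) (kk : Int) (ys : List Int) (i : Int) : Int × Int :=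
  match ys with
  | [] => (0, i)                 -- Python: NameError (y unbound, n < k); unreached inside Pre_
  | [y] =>
      let extra := count_part (n - 1 - y) (kk - 1) * nCr (n - 1) y
      (y, if i < extra then i else i - extra)
  | y :: y2 :: rest =>
      let extra := count_part (n - 1 - y) (kk - 1) * nCr (n - 1) y
      if i < extra then (y, i) else gen_y_loop n kk (y2 :: rest) (i - extra)

def gen_part (A : List Int) (k : Int) (i : Int) : List (List Int) :=
  if k = 1 then [A]
  else if k ≤ 1 then []          -- guard: Python recurses without end here (outside Pre_)
  else
    let n : Int := A.length
    let yi := gen_y_loop n k (PySem.List.pyRange 0 (n - k + 1) 1) i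
    let y := yi.1
    let c := nCr (n - 1) y
    let cp := PySem.Int.floordiv yi.2 c
    let cs := PySem.Int.mod yi.2 c
    let subset :=
      match A with
      | [] => ith_subset (PySem.List.slice A (some 1) none) y cs
            -- Python: IndexError on A[0]; unreached inside Pre_
      | a0 :: _ => a0 :: ith_subset (PySem.List.slice A (some 1) none) y cs
    let S : PySem.Set Int := PySem.Set.ofList subset
    subset :: gen_part (A.filter (fun a => !(PySem.Set.contains S a))) (k - 1) cp
termination_by k.toNat
decreasing_by omega

-- ===== PORT B =====

-- one step of B's Pascal-row loop:  row = [a+b for a,b in zip([0]+row, row+[0])]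
def pascalStep (row : List Int) : List Int :=
  List.zipWith (· + ·) (0 :: row) (row ++ [0])

-- C = [[1]]; row = [1]; for m in range(1, n+1): row = step(row); C.append(row)
def pascalRows (n : Int) : List (List Int) :=
  ((PySem.List.pyRange 1 (n + 1) 1).foldl
    (fun st _ => (st.1 ++ [pascalStep st.2], pascalStep st.2)) ([[1]], [1])).1

-- one step of B's Stirling-row loop:  srow = [0] + [j*srow[j] + srow[j-1] for j in range(1, k+1)]
def stirStep (kk : Int) (row : List Int) : List Int :=
  0 :: (PySem.List.pyRange 1 (kk + 1) 1).map
        (fun j => j * PySem.List.pyGetD row j 0 + PySem.List.pyGetD row (j - 1) 0)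

-- srow = [1] + [0]*k; S = [srow]; for m in range(1, n): srow = step(srow); S.append(srow)
def stirRows (n : Int) (kk : Int) : List (List Int) :=
  ((PySem.List.pyRange 1 n 1).foldl
    (fun st _ => (st.1 ++ [stirStep kk st.2], stirStep kk st.2))
    ([1 :: List.replicate kk.toNat 0], 1 :: List.replicate kk.toNat 0)).1

-- table lookup T[m][j]
def tblAt (T : List (List Int)) (m j : Int) : Int :=
  PySem.List.pyGetD (PySem.List.pyGetD T m []) j 0

-- B's y-selection loop (same break structure, table-based counts)
def alt_y_loop (S C : List (List Int)) (m kk : Int) (ys : List Int) (i : Int) : Int × Int :=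
  match ys with
  | [] => (0, i)                 -- Python: NameError (y unbound, m < k); unreached inside Pre_
  | [y] =>
      let extra := tblAt S (m - 1 - y) (kk - 1) * tblAt C (m - 1) y
      (y, if i < extra then i else i - extra)
  | y :: y2 :: rest =>
      let extra := tblAt S (m - 1 - y) (kk - 1) * tblAt C (m - 1) y
      if i < extra then (y, i) else alt_y_loop S C m kk (y2 :: rest) (i - extra)

-- B's inner while loop: one forward walk unranking the j-th need-subset of tail,
-- accumulating the block and the positional kept-list
def walk (C : List (List Int)) (tail : List Int) (need j : Int)
    (block kept : List Int) : List Int × List Int :=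
  match tail with
  | [] => (block, kept)
  | a :: rest =>
      let rem : Int := (a :: rest : List Int).length
      if need = rem then (block ++ a :: rest, kept)
      else if need = 0 then (block, kept ++ a :: rest)
      else
        let c := tblAt C (rem - 1) (need - 1)
        if j < c then walk C rest (need - 1) j (block ++ [a]) kept
        else walk C rest need (j - c) block (kept ++ [a])

-- termination of B's unrank: the kept list is shorter than rest (cited by decreasing_by)
theorem walk_kept_len (C : List (List Int)) : ∀ (t : List Int) (nd j : Int)
    (block kept : List Int), ((walk C t nd j block kept).2).length ≤ kept.length + t.length := by
  intro t
  induction t with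
  | nil => intro nd j block kept; simp [walk]
  | cons a rest ih =>
    intro nd j block kept
    rw [walk]
    by_cases h1 : nd = ((a :: rest : List Int).length : Int)
    · simp [h1]
    · simp only [if_neg h1]
      by_cases h2 : nd = 0
      · simp [h2]
      · simp only [if_neg h2]
        by_cases h3 : j < tblAt C (((a :: rest : List Int).length : Int) - 1) (nd - 1)
        · simp only [if_pos h3]
          have := ih (nd - 1) j (block ++ [a]) kept
          simp only [List.length_cons]
          omega
        · simp only [if_neg h3]
          have := ih nd (j - tblAt C (((a :: rest : List Int).length : Int) - 1) (nd - 1))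
            block (kept ++ [a])
          simp only [List.length_cons]
          simp only [List.length_append, List.length_cons, List.length_nil] at this
          omega

-- B's recursive unrank over k (tables are fixed)
def alt_rec (C S : List (List Int)) (rest : List Int) (k i : Int) : List (List Int) :=
  if k = 1 then [rest]
  else
    let m : Int := rest.length
    let yi := alt_y_loop S C m k (PySem.List.pyRange 0 (m - k + 1) 1) i
    let y := yi.1
    let c := tblAt C (m - 1) y
    let i' := PySem.Int.floordiv yi.2 c
    let j := PySem.Int.mod yi.2 c
    match rest with
    | [] => []       -- Python: IndexError on rest[0]; unreached inside Pre_
    | a :: tl =>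
      let bk := walk C tl y j [a] []
      bk.1 :: alt_rec C S bk.2 (k - 1) i'
termination_by rest.length
decreasing_by
  simp only [List.length_cons]
  exact Nat.lt_succ_of_le (by simpa using walk_kept_len C tl _ _ [a] [])

def gen_part_alt (A : List Int) (k : Int) (i : Int) : List (List Int) :=
  let n : Int := A.length
  if k = 1 then [A]
  else
    let C := pascalRows n
    let S := stirRows n k
    alt_rec C S A k i

-- ===== PRECONDITION & SPEC =====
-- Pre_ excludes (a) k ≤ 0 (A: RecursionError) and k > len(A) with k ≠ 1 (A: UnboundLocalError),
-- and (b) lists with duplicate elements when k ≥ 2: A removes chosen elements from A by VALUE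
-- (set membership), so duplicates make it raise UnboundLocalError on some such inputs and
-- return lists containing spurious empty blocks (not partitions of A) on the others.
def Pre_gen_part (A : List Int) (k : Int) (i : Int) : Prop :=
  k = 1 ∨ (2 ≤ k ∧ k ≤ (A.length : Int) ∧ A.Nodup)
instance (A : List Int) (k : Int) (i : Int) : Decidable (Pre_gen_part A k i) := by
  unfold Pre_gen_part; infer_instance

def pvWitness_gen_part : List Int × Int × Int := ([10, 20, 30, 40], 2, 3)

def Spec_gen_part (A : List Int) (k : Int) (i : Int) (out : List (List Int)) : Prop :=
  out = gen_part_alt A k i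
instance (A : List Int) (k : Int) (i : Int) (out : List (List Int)) :
    Decidable (Spec_gen_part A k i out) := by unfold Spec_gen_part; infer_instance

-- ===== CLAIM (what is proved, stated in full; the proofs are below) =====
def Claim_equal_gen_part : Prop := ∀ (A : List Int) (k : Int) (i : Int),
  Dom_gen_part A k i → Pre_gen_part A k i → Spec_gen_part A k i (gen_part A k i)

-- ===== LEMMAS AND PROOFS =====

-- reference combinatorial functions (proof-side only)
def binN (m j : Nat) : Int := (Nat.choose m j : Int)

def stirN : Nat → Nat → Int
  | 0, 0 => 1
  | 0, _ + 1 => 0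
  | _ + 1, 0 => 0
  | m + 1, j + 1 => ((j : Int) + 1) * stirN m (j + 1) + stirN m j

-- reference subset unranking: (selected, complement)
def pick : List Int → Nat → Int → List Int × List Int
  | [], _, _ => ([], [])
  | a :: t, need, j =>
    if need = t.length + 1 then (a :: t, [])
    else if need = 0 then ([], a :: t)
    else if j < binN t.length (need - 1) then
      let p := pick t (need - 1) j; (a :: p.1, p.2)
    else
      let p := pick t need (j - binN t.length (need - 1)); (p.1, a :: p.2)

theorem binN_pos (m j : Nat) (h : j ≤ m) : 0 < binN m j := by
  simpa [binN] using Nat.choose_pos h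

theorem stirN_eq_zero_of_lt : ∀ m j, m < j → stirN m j = 0 := by
  intro m
  induction m with
  | zero => intro j h; match j, h with | j + 1, _ => rfl
  | succ m ih =>
    intro j h
    match j, h with
    | j + 1, h =>
      rw [stirN, ih (j + 1) (by omega), ih j (by omega)]
      ring

theorem nCr_eq (n j : Nat) (h : j ≤ n) : nCr (n : Int) (j : Int) = binN n j := by
  unfold nCr pyFact binN
  have h1 : ((n : Int)).toNat = n := by omega
  have h2 : ((j : Int)).toNat = j := by omega
  have h3 : ((n : Int) - (j : Int)).toNat = n - j := by omega
  rw [h1, h2, h3]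
  have hd : 0 < ((Nat.factorial j : Int)) * (Nat.factorial (n - j) : Int) := by
    positivity
  rw [PySem.Int.floordiv_eq_ediv_of_pos hd]
  have key := Nat.choose_mul_factorial_mul_factorial h
  have : (Nat.factorial n : Int) =
      (Nat.choose n j : Int) * ((Nat.factorial j : Int) * (Nat.factorial (n - j) : Int)) := by
    push_cast [← key]; ring
  rw [this, Int.mul_ediv_cancel _ (by omega)]

theorem stirN_one : ∀ n, 1 ≤ n → stirN n 1 = 1 := by
  intro n
  induction n with
  | zero => omega
  | succ N ih =>
    intro _
    rw [show (1 : Nat) = 0 + 1 from rfl, stirN]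
    match N with
    | 0 => rfl
    | M + 1 =>
      rw [ih (by omega)]
      rw [show stirN (M + 1) 0 = 0 from rfl]
      ring

theorem aux_sum : ∀ (j' n : Nat),
    (∑ y ∈ Finset.range (n + 1 - (j' + 1)), stirN (n - 1 - y) j' * binN (n - 1) y)
      = stirN n (j' + 1) := by
  intro j'
  induction j' with
  | zero =>
    intro n
    match n with
    | 0 =>
      simp
      rfl
    | N + 1 =>
      rw [show N + 1 + 1 - (0 + 1) = N + 1 by omega]
      rw [Finset.sum_range_succ]
      have hzero : ∀ y ∈ Finset.range N, stirN (N + 1 - 1 - y) 0 * binN (N + 1 - 1) y = 0 := by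
        intro y hy
        have hy' : y < N := Finset.mem_range.mp hy
        rw [show N + 1 - 1 - y = (N - y - 1) + 1 by omega]
        rw [show stirN (N - y - 1 + 1) 0 = 0 from rfl]
        ring
      rw [Finset.sum_eq_zero hzero]
      rw [show N + 1 - 1 - N = 0 by omega]
      rw [show N + 1 - 1 = N by omega]
      rw [show stirN 0 0 = 1 from rfl]
      simp [binN]
      rw [stirN_one (N + 1) (by omega)]
  | succ j'' ih =>
    intro n
    induction n with
    | zero =>
      rw [show 0 + 1 - (j'' + 1 + 1) = 0 by omega]
      rw [show stirN 0 (j'' + 1 + 1) = 0 from rfl]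
      simp
    | succ N ihn =>
      by_cases hn : N + 1 < j'' + 1 + 1
      · rw [show N + 1 + 1 - (j'' + 1 + 1) = 0 by omega]
        rw [stirN_eq_zero_of_lt _ _ hn]
        simp
      · have hN : j'' + 1 ≤ N := by omega
        set L := N - (j'' + 1) with hL
        rw [show N + 1 + 1 - (j'' + 1 + 1) = L + 1 by omega]
        have hidx : ∀ y : Nat, N + 1 - 1 - y = N - y := by omega
        have hidx2 : N + 1 - 1 = N := by omega
        simp only [hidx2]
        -- T = ∑_{y<L+1} stirN (N-y) (j''+1) * binN N y
        rw [Finset.sum_range_succ']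
        -- pieces
        have hA1 : (∑ y ∈ Finset.range L, stirN (N - 1 - y) (j'' + 1) * binN (N - 1) y)
            = stirN N (j'' + 1 + 1) := by
          have := ihn
          rw [show N + 1 - (j'' + 1 + 1) = L by omega] at this
          simpa using this
        have hC2 : (∑ z ∈ Finset.range (L + 1), stirN (N - 1 - z) j'' * binN (N - 1) z)
            = stirN N (j'' + 1) := by
          have := ih N
          rw [show N + 1 - (j'' + 1) = L + 1 by omega] at this
          exact this
        have hC1 : (∑ z ∈ Finset.range (L + 1), stirN (N - 1 - z) (j'' + 1) * binN (N - 1) z)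
            = stirN N (j'' + 1 + 1) := by
          rw [Finset.sum_range_succ]
          rw [show N - 1 - L = j'' by omega]
          rw [stirN_eq_zero_of_lt j'' (j'' + 1) (by omega)]
          rw [hA1]; ring
        have hB : (∑ z ∈ Finset.range (L + 1), stirN (N - z) (j'' + 1) * binN (N - 1) z)
            = ((j'' : Int) + 1) * stirN N (j'' + 1 + 1) + stirN N (j'' + 1) := by
          have hexp : ∀ z ∈ Finset.range (L + 1),
              stirN (N - z) (j'' + 1) * binN (N - 1) z =
              ((j'' : Int) + 1) * (stirN (N - 1 - z) (j'' + 1) * binN (N - 1) z)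
                + stirN (N - 1 - z) j'' * binN (N - 1) z := by
            intro z hz
            have hzL : z < L + 1 := Finset.mem_range.mp hz
            rw [show N - z = (N - 1 - z) + 1 by omega]
            rw [stirN]
            ring
          rw [Finset.sum_congr rfl hexp, Finset.sum_add_distrib, ← Finset.mul_sum, hC1, hC2]
        have hA2 : (∑ y ∈ Finset.range L, stirN (N - (y + 1)) (j'' + 1) * binN N (y + 1))
            = ((j'' : Int) + 2) * stirN N (j'' + 1 + 1) := by
          have hpas : ∀ y ∈ Finset.range L,
              stirN (N - (y + 1)) (j'' + 1) * binN N (y + 1) =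
              stirN (N - 1 - y) (j'' + 1) * binN (N - 1) y
                + stirN (N - 1 - y) (j'' + 1) * binN (N - 1) (y + 1) := by
            intro y hy
            have hyL : y < L := Finset.mem_range.mp hy
            rw [show N - (y + 1) = N - 1 - y by omega]
            have : binN N (y + 1) = binN (N - 1) y + binN (N - 1) (y + 1) := by
              unfold binN
              rw [show N = (N - 1) + 1 by omega]
              rw [Nat.choose_succ_succ]
              push_cast
              rfl
            rw [this]; ring
          rw [Finset.sum_congr rfl hpas, Finset.sum_add_distrib, hA1]
          -- second piece: ∑_{y<L} stirN (N-1-y) (j''+1) * binN (N-1) (y+1)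
          have hresh : (∑ y ∈ Finset.range L, stirN (N - 1 - y) (j'' + 1) * binN (N - 1) (y + 1))
              = ((j'' : Int) + 1) * stirN N (j'' + 1 + 1) + stirN N (j'' + 1)
                - stirN N (j'' + 1) * binN (N - 1) 0 := by
            rw [← hB, Finset.sum_range_succ']
            have hc : ∀ y ∈ Finset.range L, stirN (N - (y + 1)) (j'' + 1) * binN (N - 1) (y + 1)
                = stirN (N - 1 - y) (j'' + 1) * binN (N - 1) (y + 1) := by
              intro y hy
              rw [show N - (y + 1) = N - 1 - y by omega]
            rw [Finset.sum_congr rfl hc, show N - 0 = N by omega]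
            ring
          rw [hresh]
          have : binN (N - 1) 0 = 1 := by simp [binN]
          rw [this]
          ring
        rw [hA2]
        rw [show N - 0 = N by omega]
        have hb0 : binN N 0 = 1 := by simp [binN]
        rw [hb0]
        rw [show j'' + 1 + 1 = (j'' + 1) + 1 from rfl, stirN]
        push_cast
        ring

theorem count_part_eq (j : Nat) (hj : 1 ≤ j) : ∀ (n : Nat), (j = 1 → 1 ≤ n) →
    count_part (n : Int) (j : Int) = stirN n j := by
  induction j with
  | zero => omega
  | succ J ihJ =>
    intro n hn
    by_cases hJ0 : J = 0
    · subst hJ0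
      have h1 : ((0 + 1 : Nat) : Int) = 1 := by norm_num
      rw [count_part, if_pos h1, stirN_one n (hn rfl)]
    · have hJ1 : 1 ≤ J := by omega
      rw [count_part]
      rw [if_neg (by push_cast; omega), if_neg (by push_cast; omega)]
      rw [PySem.List.foldl_add
        (g := fun y => count_part ((n : Int) - 1 - y) (((J + 1 : Nat) : Int) - 1) *
          nCr ((n : Int) - 1) y)]
      rw [PySem.List.pyRange_one 0 ((n : Int) - ((J + 1 : Nat) : Int) + 1), List.map_map]
      have hM : (((n : Int) - ((J + 1 : Nat) : Int) + 1) - 0).toNat = n + 1 - (J + 1) := by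
        omega
      rw [hM]
      have hbridge : ∀ (M : Nat) (f : Nat → Int),
          ((List.range M).map f).sum = ∑ y ∈ Finset.range M, f y := fun _ _ => rfl
      rw [hbridge]
      have hterm : ∀ y ∈ Finset.range (n + 1 - (J + 1)),
          ((fun y => count_part ((n : Int) - 1 - y) (((J + 1 : Nat) : Int) - 1) *
            nCr ((n : Int) - 1) y) ∘ (fun k : Nat => (0 : Int) + (k : Int))) y =
          stirN (n - 1 - y) J * binN (n - 1) y := by
        intro y hy
        have hyb : y < n + 1 - (J + 1) := Finset.mem_range.mp hy
        have hyn : y + J + 1 ≤ n := by omega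
        simp only [Function.comp_apply]
        have e1 : (n : Int) - 1 - ((0 : Int) + (y : Int)) = ((n - 1 - y : Nat) : Int) := by
          omega
        have e2 : ((J + 1 : Nat) : Int) - 1 = ((J : Nat) : Int) := by push_cast; ring
        have e4 : (n : Int) - 1 = ((n - 1 : Nat) : Int) := by omega
        have e3 : (0 : Int) + (y : Int) = ((y : Nat) : Int) := by ring
        rw [e1, e2]
        rw [ihJ hJ1 (n - 1 - y) (by omega)]
        rw [e4, e3, nCr_eq (n - 1) y (by omega)]
      rw [Finset.sum_congr rfl hterm, aux_sum J n]
      ring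

theorem foldl_ignore_iterate {α β : Type} (g : β → β) : ∀ (l : List α) (s : β),
    l.foldl (fun st _ => g st) s = g^[l.length] s := by
  intro l
  induction l with
  | nil => intro s; rfl
  | cons a t ih =>
    intro s
    simp only [List.foldl_cons, List.length_cons, ih (g s)]
    rw [Function.iterate_succ_apply]

def rowP (m : Nat) : List Int := (List.range (m + 1)).map (fun t => binN m t)

def rowS (K m : Nat) : List Int := (List.range (K + 1)).map (fun t => stirN m t)

theorem pascalStep_eq (m : Nat) :
    pascalStep ((List.range (m + 1)).map (fun t => binN m t)) =
      (List.range (m + 2)).map (fun t => binN (m + 1) t) := by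
  apply List.ext_getElem
  · simp [pascalStep]
  · intro idx h1 h2
    simp only [pascalStep, List.getElem_zipWith, List.getElem_map, List.getElem_range]
    have hlen : ((List.range (m + 1)).map (fun t => binN m t)).length = m + 1 := by simp
    match idx with
    | 0 =>
      simp [binN]
    | t + 1 =>
      rw [List.getElem_cons_succ, List.getElem_map, List.getElem_range]
      by_cases ht : t + 1 < m + 1
      · rw [List.getElem_append_left (by simpa using ht), List.getElem_map, List.getElem_range]
        simp only [binN]
        rw [← Nat.cast_add, Nat.choose_succ_succ']
      · have ht' : t = m := by
          simp only [pascalStep, List.length_zipWith] at h1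
          simp at h1; omega
        subst ht'
        rw [List.getElem_append_right (by simp at ht; omega)]
        simp only [hlen]
        simp [binN, Nat.choose_self]

theorem pascalRows_iter : ∀ (L : Nat),
    (fun st : List (List Int) × List Int => (st.1 ++ [pascalStep st.2], pascalStep st.2))^[L]
      ((List.range 1).map rowP, rowP 0) = ((List.range (L + 1)).map rowP, rowP L) := by
  intro L
  induction L with
  | zero => rfl
  | succ L ih =>
    rw [Function.iterate_succ_apply', ih]
    have hstep : pascalStep (rowP L) = rowP (L + 1) := pascalStep_eq L
    simp only [hstep, List.range_succ (n := L + 1), List.map_append, List.map_cons,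
      List.map_nil]

theorem pascalRows_eq (n : Nat) :
    pascalRows (n : Int) =
      (List.range (n + 1)).map (fun m => (List.range (m + 1)).map (fun t => binN m t)) := by
  unfold pascalRows
  rw [foldl_ignore_iterate]
  have hlen : (PySem.List.pyRange 1 ((n : Int) + 1) 1).length = n := by
    rw [PySem.List.length_pyRange_one]; omega
  rw [hlen]
  have h0 : ([[(1 : Int)]], [(1 : Int)]) = ((List.range 1).map rowP, rowP 0) := by
    simp [rowP, binN]
  rw [h0, pascalRows_iter n]
  rfl

theorem rowS_zero (K : Nat) : (1 : Int) :: List.replicate K 0 = rowS K 0 := by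
  apply List.ext_getElem
  · simp [rowS]
  · intro idx h1 h2
    simp only [rowS, List.getElem_map, List.getElem_range]
    match idx with
    | 0 => rfl
    | t + 1 =>
      rw [List.getElem_cons_succ, List.getElem_replicate]
      rfl

theorem stirStep_eq (K m : Nat) :
    stirStep (K : Int) ((List.range (K + 1)).map (fun t => stirN m t)) =
      (List.range (K + 1)).map (fun t => stirN (m + 1) t) := by
  unfold stirStep
  have hr : (K : Int) + 1 = ((K + 1 : Nat) : Int) := by push_cast; ring
  rw [hr, PySem.List.pyRange_one 1 ((K + 1 : Nat) : Int)]
  have hK : (((K + 1 : Nat) : Int) - 1).toNat = K := by omega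
  rw [hK, List.map_map]
  conv_rhs => rw [List.range_succ_eq_map, List.map_cons, List.map_map]
  congr 1
  apply List.map_congr_left
  intro a ha
  have haK : a < K := List.mem_range.mp ha
  simp only [Function.comp_apply]
  have e1 : (1 : Int) + (a : Int) = ((a + 1 : Nat) : Int) := by push_cast; ring
  rw [e1]
  have e2 : ((a + 1 : Nat) : Int) - 1 = ((a : Nat) : Int) := by push_cast; ring
  rw [e2, PySem.List.pyGetD_natCast, PySem.List.pyGetD_natCast]
  rw [List.getD_eq_getElem?_getD, List.getD_eq_getElem?_getD, List.getElem?_map,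
    List.getElem?_map, List.getElem?_range (by omega), List.getElem?_range (by omega)]
  simp only [Option.map_some, Option.getD_some]
  rw [stirN]
  push_cast
  ring

theorem stirRows_iter (K : Nat) : ∀ (L : Nat),
    (fun st : List (List Int) × List Int => (st.1 ++ [stirStep K st.2], stirStep K st.2))^[L]
      ((List.range 1).map (rowS K), rowS K 0) = ((List.range (L + 1)).map (rowS K), rowS K L) := by
  intro L
  induction L with
  | zero => rfl
  | succ L ih =>
    rw [Function.iterate_succ_apply', ih]
    have hstep : stirStep K (rowS K L) = rowS K (L + 1) := stirStep_eq K L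
    simp only [hstep, List.range_succ (n := L + 1), List.map_append, List.map_cons,
      List.map_nil]

theorem stirRows_eq (n K : Nat) (hn : 1 ≤ n) :
    stirRows (n : Int) (K : Int) =
      (List.range n).map (fun m => (List.range (K + 1)).map (fun t => stirN m t)) := by
  unfold stirRows
  rw [foldl_ignore_iterate]
  have hK : ((K : Int)).toNat = K := by omega
  rw [hK]
  have hlen : (PySem.List.pyRange 1 (n : Int) 1).length = n - 1 := by
    rw [PySem.List.length_pyRange_one]; omega
  rw [hlen, rowS_zero K]
  have h0 : ([rowS K 0], rowS K 0) = ((List.range 1).map (rowS K), rowS K 0) := by simp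
  rw [h0, stirRows_iter K (n - 1)]
  have : n - 1 + 1 = n := by omega
  rw [this]
  simp [rowS]

theorem tblAt_pascal (n m j : Nat) (hm : m ≤ n) (hj : j ≤ m) :
    tblAt (pascalRows (n : Int)) (m : Int) (j : Int) = binN m j := by
  unfold tblAt
  rw [pascalRows_eq n]
  rw [PySem.List.pyGetD_natCast, PySem.List.pyGetD_natCast]
  have houter : (List.map (fun m => List.map (fun t => binN m t) (List.range (m + 1)))
      (List.range (n + 1))).getD m [] = List.map (fun t => binN m t) (List.range (m + 1)) := by
    rw [List.getD_eq_getElem?_getD, List.getElem?_map, List.getElem?_range (by omega)]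
    simp
  rw [houter, List.getD_eq_getElem?_getD, List.getElem?_map, List.getElem?_range (by omega)]
  simp

theorem tblAt_stir (n K m j : Nat) (hm : m < n) (hj : j ≤ K) :
    tblAt (stirRows (n : Int) (K : Int)) (m : Int) (j : Int) = stirN m j := by
  unfold tblAt
  rw [stirRows_eq n K (by omega)]
  rw [PySem.List.pyGetD_natCast, PySem.List.pyGetD_natCast]
  have houter : (List.map (fun m => List.map (fun t => stirN m t) (List.range (K + 1)))
      (List.range n)).getD m [] = List.map (fun t => stirN m t) (List.range (K + 1)) := by
    rw [List.getD_eq_getElem?_getD, List.getElem?_map, List.getElem?_range (by omega)]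
    simp
  rw [houter, List.getD_eq_getElem?_getD, List.getElem?_map, List.getElem?_range (by omega)]
  simp

theorem y_loop_eq (S C : List (List Int)) (n kk : Int) : ∀ (ys : List Int) (i : Int),
    (∀ y ∈ ys, count_part (n - 1 - y) (kk - 1) * nCr (n - 1) y =
      tblAt S (n - 1 - y) (kk - 1) * tblAt C (n - 1) y) →
    gen_y_loop n kk ys i = alt_y_loop S C n kk ys i := by
  intro ys
  induction ys with
  | nil => intro i _; rfl
  | cons y t ih =>
    intro i hext
    match t with
    | [] =>
      rw [gen_y_loop, alt_y_loop, hext y (by simp)]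
    | y2 :: rest =>
      rw [gen_y_loop, alt_y_loop, hext y (by simp)]
      by_cases hlt : i < tblAt S (n - 1 - y) (kk - 1) * tblAt C (n - 1) y
      · simp [hlt]
      · simp only [if_neg hlt]
        exact ih _ (fun z hz => hext z (List.mem_cons_of_mem _ hz))

theorem y_loop_mem (n kk : Int) : ∀ (ys : List Int) (i : Int), ys ≠ [] →
    (gen_y_loop n kk ys i).1 ∈ ys := by
  intro ys
  induction ys with
  | nil => intro i h; exact absurd rfl h
  | cons y t ih =>
    intro i _
    match t with
    | [] => simp [gen_y_loop]
    | y2 :: rest =>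
      rw [gen_y_loop]
      by_cases hlt : i < count_part (n - 1 - y) (kk - 1) * nCr (n - 1) y
      · simp [hlt]
      · simp only [if_neg hlt]
        exact List.mem_cons_of_mem _ (ih _ (by simp))

theorem ith_find_shift (kk : Int) : ∀ (l : List Int) (n pos i : Int),
    ith_find n kk (pos + 1) l i = ith_find (n - 1) kk pos l i := by
  intro l
  induction l with
  | nil => intro n pos i; rfl
  | cons a t ih =>
    intro n pos i
    match t with
    | [] =>
      rw [ith_find, ith_find]
      have : n - (pos + 1) - 1 = n - 1 - pos - 1 := by ring
      rw [this]
    | b :: rest =>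
      rw [ith_find, ith_find]
      have : n - (pos + 1) - 1 = n - 1 - pos - 1 := by ring
      rw [this]
      by_cases hlt : i < nCr (n - 1 - pos - 1) (kk - 1)
      · simp [hlt]
      · simp only [if_neg hlt]
        exact ih n (pos + 1) _

theorem pick_length : ∀ (t : List Int) (nd : Nat) (j : Int), nd ≤ t.length →
    (pick t nd j).1.length = nd ∧ (pick t nd j).2.length = t.length - nd := by
  intro t
  induction t with
  | nil => intro nd j h; simp at h; simp [pick, h]
  | cons a t ih =>
    intro nd j h
    rw [pick]
    by_cases hfull : nd = t.length + 1
    · simp [hfull]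
    · simp only [if_neg hfull]
      by_cases h0 : nd = 0
      · simp [h0]
      · simp only [if_neg h0]
        by_cases hlt : j < binN t.length (nd - 1)
        · simp only [if_pos hlt]
          have := ih (nd - 1) j (by simp at h; omega)
          simp only [List.length_cons] at h ⊢
          omega
        · simp only [if_neg hlt]
          have := ih nd (j - binN t.length (nd - 1)) (by simp at h; omega)
          simp only [List.length_cons] at h ⊢
          omega

theorem pick_sublist : ∀ (t : List Int) (nd : Nat) (j : Int),
    (pick t nd j).1.Sublist t ∧ (pick t nd j).2.Sublist t := by
  intro t
  induction t with
  | nil => intro nd j; simp [pick]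
  | cons a t ih =>
    intro nd j
    rw [pick]
    by_cases hfull : nd = t.length + 1
    · simp [hfull]
    · simp only [if_neg hfull]
      by_cases h0 : nd = 0
      · simp [h0]
      · simp only [if_neg h0]
        by_cases hlt : j < binN t.length (nd - 1)
        · simp only [if_pos hlt]
          exact ⟨(ih (nd - 1) j).1.cons₂ a, (ih (nd - 1) j).2.cons a⟩
        · simp only [if_neg hlt]
          exact ⟨(ih nd _).1.cons a, (ih nd _).2.cons₂ a⟩

theorem pick_filter : ∀ (t : List Int) (nd : Nat) (j : Int), t.Nodup →
    (pick t nd j).2 = t.filter (fun a => !((pick t nd j).1.contains a)) := by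
  intro t
  induction t with
  | nil => intro nd j _; simp [pick]
  | cons a t ih =>
    intro nd j hnd
    have hna : a ∉ t := (List.nodup_cons.mp hnd).1
    have hnt : t.Nodup := (List.nodup_cons.mp hnd).2
    rw [pick]
    by_cases hfull : nd = t.length + 1
    · simp only [if_pos hfull]
      rw [List.filter_eq_nil_iff.mpr ?_]
      intro x hx
      simp
      intro hne
      exact (List.mem_cons.mp hx).resolve_left hne
    · simp only [if_neg hfull]
      by_cases h0 : nd = 0
      · simp only [if_pos h0]
        rw [List.filter_eq_self.mpr ?_]
        intro x _; simp
      · simp only [if_neg h0]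
        by_cases hlt : j < binN t.length (nd - 1)
        · simp only [if_pos hlt]
          rw [List.filter_cons_of_neg (by simp)]
          rw [ih (nd - 1) j hnt]
          apply List.filter_congr
          intro x hx
          have hxa : x ≠ a := fun he => hna (he ▸ hx)
          simp [hxa]
        · simp only [if_neg hlt]
          have hns : a ∉ (pick t nd (j - binN t.length (nd - 1))).1 := fun hmem =>
            hna ((pick_sublist t nd _).1.subset hmem)
          rw [List.filter_cons_of_pos (by simpa using hns)]
          rw [ih nd _ hnt]

theorem ith_subset_all (t : List Int) : ith_subset t (t.length : Int) 0 = t := by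
  rw [ith_subset]
  simp

theorem nCr_self_eq_one (m : Nat) : nCr (m : Int) (m : Int) = 1 := by
  rw [nCr_eq m m (le_refl m)]
  simp [binN]

theorem ith_find_all (x : Int) (xs : List Int) :
    ith_find ((xs.length + 1 : Nat) : Int) ((xs.length + 1 : Nat) : Int) 0 (x :: xs) 0 =
      (some x, 0, xs) := by
  have hc : ((xs.length + 1 : Nat) : Int) - 0 - 1 = (xs.length : Nat) := by push_cast; ring
  have hk : ((xs.length + 1 : Nat) : Int) - 1 = (xs.length : Nat) := by push_cast; ring
  match xs with
  | [] =>
    rw [ith_find]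
    simp only [hc, hk]
    rw [nCr_self_eq_one]
    norm_num
  | b :: rest =>
    rw [ith_find]
    simp only [hc, hk]
    rw [nCr_self_eq_one]
    norm_num

theorem ith_subset_eq_pick : ∀ (t : List Int) (nd : Nat) (j : Int), nd ≤ t.length →
    0 ≤ j → j < binN t.length nd →
    ith_subset t (nd : Int) j = (pick t nd j).1 := by
  intro t
  induction t with
  | nil =>
    intro nd j h _ _
    simp at h
    subst h
    simp [pick, ith_subset]
  | cons a t ih =>
    intro nd j hle h0 hub
    have hlc : (a :: t).length = t.length + 1 := rfl
    rw [pick]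
    by_cases hfull : nd = t.length + 1
    · simp only [if_pos hfull]
      have : ((a :: t).length : Int) = (nd : Int) := by rw [hlc, hfull]
      rw [ith_subset, if_pos this]
    · simp only [if_neg hfull]
      by_cases hz : nd = 0
      · simp only [if_pos hz]
        subst hz
        rw [ith_subset, if_neg (by rw [hlc]; push_cast; omega), if_pos (by norm_num)]
      · simp only [if_neg hz]
        have hnd1 : 1 ≤ nd := by omega
        have hndt : nd ≤ t.length := by omega
        cases t with
        | nil => simp at hndt; omega
        | cons b tt =>
          have hlc2 : (b :: tt).length = tt.length + 1 := rfl
          rw [ith_subset, if_neg (by rw [hlc, hlc2]; push_cast; omega),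
            if_neg (by exact_mod_cast hz)]
          have hc : (((a :: b :: tt).length : Nat) : Int) - 0 - 1 =
              (((b :: tt).length : Nat) : Int) := by rw [hlc, hlc2]; push_cast; ring
          have hk : ((nd : Nat) : Int) - 1 = ((nd - 1 : Nat) : Int) := by omega
          by_cases hlt : j < binN (b :: tt).length (nd - 1)
          · -- ith_find breaks at x = 0
            have hfind : ith_find (((a :: b :: tt).length : Nat) : Int) (nd : Int) 0
                (a :: b :: tt) j = (some a, j, b :: tt) := by
              rw [ith_find]
              simp only [hc, hk]
              rw [nCr_eq _ _ (by omega)]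
              simp only [if_pos hlt]
            rw [hfind]
            simp only [if_pos hlt]
            rw [hk, ih (nd - 1) j (by omega) h0 hlt]
          · -- continue scanning: step to the tail
            have hstep : ith_find (((a :: b :: tt).length : Nat) : Int) (nd : Int) 0
                (a :: b :: tt) j =
                ith_find (((b :: tt).length : Nat) : Int) (nd : Int) 0 (b :: tt)
                  (j - binN (b :: tt).length (nd - 1)) := by
              rw [ith_find]
              simp only [hc, hk]
              rw [nCr_eq _ _ (by omega)]
              simp only [if_neg hlt]
              rw [ith_find_shift (nd : Int) (b :: tt) ((((a :: b :: tt).length : Nat)) : Int) 0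
                (j - binN (b :: tt).length (nd - 1))]
              congr 1
            rw [hstep]
            simp only [if_neg hlt]
            have hj0' : 0 ≤ j - binN (b :: tt).length (nd - 1) := by omega
            have hub' : j - binN (b :: tt).length (nd - 1) < binN (b :: tt).length nd := by
              have hpas : binN (a :: b :: tt).length nd =
                  binN (b :: tt).length (nd - 1) + binN (b :: tt).length nd := by
                unfold binN
                have h2 : nd = (nd - 1) + 1 := by omega
                rw [show (a :: b :: tt).length = (b :: tt).length + 1 from rfl, h2,
                  Nat.choose_succ_succ]
                push_cast
                simp [Nat.succ_eq_add_one]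
              omega
            by_cases hself : (b :: tt).length = nd
            · -- the tail must be taken whole; both sides give b :: tt
              have hj0 : j - binN (b :: tt).length (nd - 1) = 0 := by
                have : binN (b :: tt).length nd = 1 := by
                  rw [hself]; simp [binN]
                omega
              have hndl : ((nd : Nat) : Int) = (((b :: tt).length : Nat) : Int) := by
                exact_mod_cast hself.symm
              rw [hj0, hndl]
              have hall := ith_find_all b tt
              rw [show ((tt.length + 1 : Nat) : Int) = (((b :: tt).length : Nat) : Int)
                from rfl] at hall
              rw [hall]
              have harg : (((b :: tt).length : Nat) : Int) - 1 = ((tt.length : Nat) : Int) := by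
                rw [hlc2]; push_cast; ring
              rw [harg]
              show b :: ith_subset tt ((tt.length : Nat) : Int) 0 = (pick (b :: tt) nd 0).1
              rw [ith_subset_all tt, pick, if_pos (by omega)]
            · -- tail still strictly longer: the goal is the unfolding of ith_subset on the tail
              have hrec := ih nd (j - binN (b :: tt).length (nd - 1)) (by omega) hj0' hub'
              rw [ith_subset, if_neg (by rw [hlc2]; push_cast; omega),
                if_neg (by exact_mod_cast hz)] at hrec
              exact hrec

theorem walk_eq_pick (n0 : Nat) : ∀ (t : List Int) (nd : Nat) (j : Int)
    (block kept : List Int), nd ≤ t.length → t.length ≤ n0 →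
    walk (pascalRows (n0 : Int)) t (nd : Int) j block kept =
      (block ++ (pick t nd j).1, kept ++ (pick t nd j).2) := by
  intro t
  induction t with
  | nil => intro nd j block kept h _; simp at h; simp [walk, pick]
  | cons a t ih =>
    intro nd j block kept hle hcap
    rw [walk, pick]
    have hrem : ((a :: t : List Int).length : Int) = ((t.length + 1 : Nat) : Int) := by simp
    by_cases hfull : nd = t.length + 1
    · have : (nd : Int) = ((a :: t : List Int).length : Int) := by simp [hfull]
      simp only [if_pos this, if_pos hfull]
      simp
    · have hne : ¬ ((nd : Int) = ((a :: t : List Int).length : Int)) := by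
        simp only [List.length_cons]; exact_mod_cast fun h => hfull (by exact_mod_cast h)
      simp only [if_neg hne, if_neg hfull]
      by_cases h0 : nd = 0
      · have : (nd : Int) = 0 := by exact_mod_cast h0
        simp only [if_pos this, if_pos h0]
        simp
      · have hne0 : ¬ ((nd : Int) = 0) := by exact_mod_cast h0
        simp only [if_neg hne0, if_neg h0]
        have hndt : nd ≤ t.length := by simp at hle; omega
        have hcast1 : ((a :: t : List Int).length : Int) - 1 = ((t.length : Nat) : Int) := by
          simp
        have hcast2 : (nd : Int) - 1 = ((nd - 1 : Nat) : Int) := by omega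
        have htbl : tblAt (pascalRows (n0 : Int)) ((a :: t : List Int).length - 1)
            ((nd : Int) - 1) = binN t.length (nd - 1) := by
          rw [hcast1, hcast2]
          exact tblAt_pascal n0 t.length (nd - 1) (by simp at hcap; omega) (by omega)
        rw [htbl]
        by_cases hlt : j < binN t.length (nd - 1)
        · simp only [if_pos hlt]
          rw [hcast2, ih (nd - 1) j (block ++ [a]) kept (by omega) (by simp at hcap; omega)]
          simp
        · simp only [if_neg hlt]
          rw [ih nd _ block (kept ++ [a]) (by omega) (by simp at hcap; omega)]
          simp

theorem main_loop (n0 k0 : Nat) : ∀ (km : Nat) (rest : List Int) (k i : Int),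
    k.toNat = km → 1 ≤ k → k ≤ (rest.length : Int) →
    rest.Nodup → rest.length ≤ n0 → k ≤ (k0 : Int) →
    alt_rec (pascalRows (n0 : Int)) (stirRows (n0 : Int) (k0 : Int)) rest k i =
      gen_part rest k i := by
  intro km
  induction km with
  | zero => intro rest k i h1 h2; omega
  | succ km' ih =>
    intro rest k i hkm hk1 hkle hnd hcap hkk0
    by_cases hk1' : k = 1
    · subst hk1'
      unfold alt_rec
      rw [if_pos rfl, gen_part, if_pos rfl]
    · have hk2 : 2 ≤ k := by omega
      -- rest is nonempty
      match rest, hkle, hnd, hcap with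
      | [], hkle, hnd, hcap =>
        simp at hkle
        omega
      | a0 :: tl, hkle, hnd, hcap =>
        have hlc : (a0 :: tl).length = tl.length + 1 := rfl
        have hM2 : 2 ≤ (a0 :: tl).length := by omega
        unfold alt_rec
        rw [if_neg hk1', gen_part, if_neg hk1', if_neg (by omega)]
        dsimp only
        -- abbreviations
        have hkn : k = ((k.toNat : Nat) : Int) := by omega
        -- the y-selection loops agree
        have hyl : gen_y_loop ((a0 :: tl).length : Int) k
            (PySem.List.pyRange 0 (((a0 :: tl).length : Int) - k + 1) 1) i =
            alt_y_loop (stirRows (n0 : Int) (k0 : Int)) (pascalRows (n0 : Int))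
              ((a0 :: tl).length : Int) k
              (PySem.List.pyRange 0 (((a0 :: tl).length : Int) - k + 1) 1) i := by
          apply y_loop_eq
          intro y hy
          have hyb := (PySem.List.mem_pyRange_one).mp hy
          have hy0 : 0 ≤ y := hyb.1
          have hyub : y ≤ ((a0 :: tl).length : Int) - k := by omega
          have e1 : ((a0 :: tl).length : Int) - 1 - y =
              (((a0 :: tl).length - 1 - y.toNat : Nat) : Int) := by omega
          have e2 : k - 1 = ((k.toNat - 1 : Nat) : Int) := by omega
          have e3 : ((a0 :: tl).length : Int) - 1 = (((a0 :: tl).length - 1 : Nat) : Int) := by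
            omega
          have e4 : y = ((y.toNat : Nat) : Int) := by omega
          rw [e1, e2, e3]
          conv_lhs => rw [e4]
          conv_rhs => rw [e4]
          rw [count_part_eq (k.toNat - 1) (by omega) _ (by intro h; omega)]
          rw [nCr_eq _ _ (by omega)]
          rw [tblAt_stir n0 k0 _ _ (by omega) (by omega)]
          rw [tblAt_pascal n0 _ _ (by omega) (by omega)]
        rw [← hyl]
        -- the chosen y is in range
        have hne : PySem.List.pyRange 0 (((a0 :: tl).length : Int) - k + 1) 1 ≠ [] := by
          rw [PySem.List.pyRange_one_cons (by omega)]
          simp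
        have hymem := y_loop_mem ((a0 :: tl).length : Int) k _ i hne
        have hyb := (PySem.List.mem_pyRange_one).mp hymem
        set P := gen_y_loop ((a0 :: tl).length : Int) k
          (PySem.List.pyRange 0 (((a0 :: tl).length : Int) - k + 1) 1) i with hP
        have hy0 : 0 ≤ P.1 := hyb.1
        have hyub : P.1 ≤ ((a0 :: tl).length : Int) - k := by omega
        have eyn : P.1 = ((P.1.toNat : Nat) : Int) := by omega
        have etl : ((a0 :: tl).length : Int) - 1 = ((tl.length : Nat) : Int) := by omega
        -- the two divisors agree
        have hcB : tblAt (pascalRows (n0 : Int)) (((a0 :: tl).length : Int) - 1) P.1 =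
            nCr (((a0 :: tl).length : Int) - 1) P.1 := by
          rw [etl]
          conv_lhs => rw [eyn]
          conv_rhs => rw [eyn]
          rw [tblAt_pascal n0 _ _ (by omega) (by omega), nCr_eq _ _ (by omega)]
        rw [hcB]
        -- the divisor is positive
        have hcpos : 0 < nCr (((a0 :: tl).length : Int) - 1) P.1 := by
          rw [etl, eyn, nCr_eq _ _ (by omega)]
          exact binN_pos _ _ (by omega)
        -- slice A[1:] = tl
        have hsl : PySem.List.slice (a0 :: tl) (some 1) none = tl := by
          rw [PySem.List.slice_from_one]
          rfl
        rw [hsl]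
        -- bounds for the subset counter
        have hcs0 : 0 ≤ PySem.Int.mod P.2 (nCr (((a0 :: tl).length : Int) - 1) P.1) :=
          PySem.Int.mod_nonneg _ hcpos
        have hcsub : PySem.Int.mod P.2 (nCr (((a0 :: tl).length : Int) - 1) P.1) <
            nCr (((a0 :: tl).length : Int) - 1) P.1 := PySem.Int.mod_lt _ hcpos
        -- walk = pick, ith_subset = pick
        have hwalk := walk_eq_pick n0 tl P.1.toNat
          (PySem.Int.mod P.2 (nCr (((a0 :: tl).length : Int) - 1) P.1)) [a0] []
          (by omega) (by omega)
        rw [← eyn] at hwalk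
        rw [hwalk]
        have hsub := ith_subset_eq_pick tl P.1.toNat
          (PySem.Int.mod P.2 (nCr (((a0 :: tl).length : Int) - 1) P.1))
          (by omega) hcs0 (by
            have : nCr (((a0 :: tl).length : Int) - 1) P.1 = binN tl.length P.1.toNat := by
              rw [etl]
              conv_lhs => rw [eyn]
              rw [nCr_eq _ _ (by omega)]
            omega)
        rw [← eyn] at hsub
        rw [hsub]
        dsimp only
        -- the filtered remainder is pick's complement
        have hfilt : List.filter (fun a => !PySem.Set.contains (PySem.Set.ofList
            (a0 :: (pick tl P.1.toNat
              (PySem.Int.mod P.2 (nCr (((a0 :: tl).length : Int) - 1) P.1))).1)) a) (a0 :: tl) =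
            (pick tl P.1.toNat
              (PySem.Int.mod P.2 (nCr (((a0 :: tl).length : Int) - 1) P.1))).2 := by
          have hna : a0 ∉ tl := (List.nodup_cons.mp hnd).1
          have hnt : tl.Nodup := (List.nodup_cons.mp hnd).2
          rw [List.filter_cons_of_neg (by simp)]
          rw [pick_filter tl _ _ hnt]
          apply List.filter_congr
          intro x hx
          have hxa : x ≠ a0 := fun he => hna (he ▸ hx)
          simp [hxa]
        rw [hfilt]
        simp only [List.nil_append, List.singleton_append]
        -- close by the induction hypothesis
        have hlen2 := pick_length tl P.1.toNat
          (PySem.Int.mod P.2 (nCr (((a0 :: tl).length : Int) - 1) P.1)) (by omega)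
        have hsubl := pick_sublist tl P.1.toNat
          (PySem.Int.mod P.2 (nCr (((a0 :: tl).length : Int) - 1) P.1))
        rw [ih _ (k - 1) _
          (by omega) (by omega) (by
            have := hlen2.2
            omega)
          (hsubl.2.nodup (List.nodup_cons.mp hnd).2)
          (by
            have := hsubl.2.length_le
            omega)
          (by omega)]

-- ===== VERDICT (by name: the statement is the Claim_ definition above) =====
theorem gen_part_spec : Claim_equal_gen_part := by
  intro A k i _ hpre
  unfold Spec_gen_part
  rcases hpre with h1 | ⟨h2, h3, h4⟩
  · subst h1; rw [gen_part, gen_part_alt]; simp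
  · rw [gen_part_alt]
    have hk1 : ¬ (k = 1) := by omega
    simp only [if_neg hk1]
    have hk : ((k.toNat : Int)) = k := by omega
    rw [← hk]
    rw [main_loop A.length k.toNat k.toNat A ((k.toNat : Int)) i rfl (by omega)
      (by omega) h4 (le_refl _) (le_refl _)]
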